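-- pv_equiv track=rewrite | github.com/sm136599/baekjoon_practice | 1022_소용돌이 예쁘게 출력하기/solve.py | get
-- ===== SOURCE A (Python) =====
-- def get(tarI, tarJ):
--     r = max(abs(tarI-5000), abs(tarJ-5000))
--     curI, curJ = r + 5000, r + 5000
--     val = 2*r + 1
--
--     tmp = val**2
--
--     if curI == tarI and curJ == tarJ:
--         return tmp
--
--     for _ in range(val-1):
--         curJ -= 1
--         tmp -= 1
--         if curI == tarI and curJ == tarJ:
--             return tmp
--
--     for _ in range(val-1):
--         curI -= 1
--         tmp -= 1
--         if curI == tarI and curJ == tarJ: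
--             return tmp
--
--     for _ in range(val-1):
--         curJ += 1
--         tmp -= 1
--         if curI == tarI and curJ == tarJ:
--             return tmp
--
--     for _ in range(val-2):
--         curI += 1
--         tmp -= 1
--         if curI == tarI and curJ == tarJ:
--             return tmp
-- ===== SOURCE B (Python) =====
-- def get(tarI, tarJ):
--     di, dj = tarI - 5000, tarJ - 5000
--     r = max(abs(di), abs(dj))
--     top = (2 * r + 1) ** 2
--     if di == r:               # bottom row, walked right-to-left from the start corner
--         return top - (r - dj)
--     if dj == -r:              # left column, walked bottom-to-top
--         return top - 2 * r - (r - di)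
--     if di == -r:              # top row, walked left-to-right
--         return top - 4 * r - (dj + r)
--     return top - 6 * r - (di + r)   # right column, walked top-to-bottom
-- ===== Notes on version B (the rewrite author's own statement) =====
-- stated objective: faster
-- what changed: Replaces the O(r) step-by-step spiral walk (four scanning loops) with an O(1) closed form: classify which side of the ring the target lies on and subtract its offset from (2r+1)^2.
import Mathlib
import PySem

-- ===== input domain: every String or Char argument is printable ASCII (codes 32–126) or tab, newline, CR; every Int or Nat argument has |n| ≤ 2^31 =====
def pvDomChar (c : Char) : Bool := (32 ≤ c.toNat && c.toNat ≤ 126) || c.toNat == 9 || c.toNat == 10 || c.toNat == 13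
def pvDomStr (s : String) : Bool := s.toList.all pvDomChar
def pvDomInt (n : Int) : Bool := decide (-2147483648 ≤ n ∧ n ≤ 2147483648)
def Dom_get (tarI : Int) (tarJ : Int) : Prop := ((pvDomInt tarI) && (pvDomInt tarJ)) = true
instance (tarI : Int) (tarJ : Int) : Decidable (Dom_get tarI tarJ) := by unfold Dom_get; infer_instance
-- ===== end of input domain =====

-- B replaces A's O(r) four-loop spiral walk by an O(1) closed-form classification of the
-- ring side; both return the same value on every input (A is total).

-- ===== PORT A =====
-- One of A's `for _ in range(n)` loops with early return: curJ moves by d each step,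
-- tmp decreases by 1, returning tmp as soon as (curI,curJ) = (tarI,tarJ).
-- Result: (early-return value if any, final curI, final curJ, final tmp).
def loopJ (d : Int) : Nat → Int → Int → Int → Int → Int → Option Int × Int × Int × Int
  | 0, curI, curJ, tmp, _, _ => (none, curI, curJ, tmp)
  | n + 1, curI, curJ, tmp, tarI, tarJ =>
      if curI = tarI ∧ curJ + d = tarJ then (some (tmp - 1), curI, curJ + d, tmp - 1)
      else loopJ d n curI (curJ + d) (tmp - 1) tarI tarJ

-- same, but curI moves by d each step
def loopI (d : Int) : Nat → Int → Int → Int → Int → Int → Option Int × Int × Int × Int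
  | 0, curI, curJ, tmp, _, _ => (none, curI, curJ, tmp)
  | n + 1, curI, curJ, tmp, tarI, tarJ =>
      if curI + d = tarI ∧ curJ = tarJ then (some (tmp - 1), curI + d, curJ, tmp - 1)
      else loopI d n (curI + d) curJ (tmp - 1) tarI tarJ

def get (tarI : Int) (tarJ : Int) : Option Int :=
  let r := max |tarI - 5000| |tarJ - 5000|
  let curI := r + 5000
  let curJ := r + 5000
  let val := 2 * r + 1
  let tmp := val ^ 2
  if curI = tarI ∧ curJ = tarJ then some tmp
  else
    match loopJ (-1) (val - 1).toNat curI curJ tmp tarI tarJ with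
    | (some v, _, _, _) => some v
    | (none, curI1, curJ1, tmp1) =>
      match loopI (-1) (val - 1).toNat curI1 curJ1 tmp1 tarI tarJ with
      | (some v, _, _, _) => some v
      | (none, curI2, curJ2, tmp2) =>
        match loopJ 1 (val - 1).toNat curI2 curJ2 tmp2 tarI tarJ with
        | (some v, _, _, _) => some v
        | (none, curI3, curJ3, tmp3) =>
          match loopI 1 (val - 2).toNat curI3 curJ3 tmp3 tarI tarJ with
          | (some v, _, _, _) => some v
          | (none, _, _, _) => none

-- ===== PORT B =====
def get_alt (tarI : Int) (tarJ : Int) : Option Int :=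
  let di := tarI - 5000
  let dj := tarJ - 5000
  let r := max |di| |dj|
  let top := (2 * r + 1) ^ 2
  if di = r then some (top - (r - dj))
  else if dj = -r then some (top - 2 * r - (r - di))
  else if di = -r then some (top - 4 * r - (dj + r))
  else some (top - 6 * r - (di + r))

-- ===== PRECONDITION & SPEC =====
def Spec_get (tarI : Int) (tarJ : Int) (out : Option Int) : Prop := out = get_alt tarI tarJ
instance (tarI : Int) (tarJ : Int) (out : Option Int) : Decidable (Spec_get tarI tarJ out) := by unfold Spec_get; infer_instance

-- ===== CLAIM (what is proved, stated in full; the proofs are below) =====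
def Claim_equal_get : Prop := ∀ (tarI : Int) (tarJ : Int), Dom_get tarI tarJ → Spec_get tarI tarJ (get tarI tarJ)

-- ===== LEMMAS AND PROOFS =====
-- Characterisation of a J-moving loop (d = ±1): early return iff the target sits on the
-- walked segment, with value tmp minus the number of steps; otherwise the final state.
theorem loopJ_eq (d : Int) (hd : d = 1 ∨ d = -1) (n : Nat) (curI curJ tmp tarI tarJ : Int) :
    loopJ d n curI curJ tmp tarI tarJ =
      if curI = tarI ∧ 1 ≤ (tarJ - curJ) * d ∧ (tarJ - curJ) * d ≤ (n : Int) then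
        (some (tmp - (tarJ - curJ) * d), curI, tarJ, tmp - (tarJ - curJ) * d)
      else (none, curI, curJ + n * d, tmp - n) := by
  rcases hd with rfl | rfl <;>
  induction n generalizing curJ tmp with
  | zero =>
      simp only [loopJ]
      rw [if_neg (by rintro ⟨-, h1, h2⟩; omega)]
      simp
  | succ n ih =>
      simp only [loopJ, ih]
      push_cast
      split_ifs <;>
        first
          | (exfalso; omega)
          | (simp only [Prod.mk.injEq, Option.some.injEq, true_and]; omega)

theorem loopI_eq (d : Int) (hd : d = 1 ∨ d = -1) (n : Nat) (curI curJ tmp tarI tarJ : Int) :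
    loopI d n curI curJ tmp tarI tarJ =
      if curJ = tarJ ∧ 1 ≤ (tarI - curI) * d ∧ (tarI - curI) * d ≤ (n : Int) then
        (some (tmp - (tarI - curI) * d), tarI, curJ, tmp - (tarI - curI) * d)
      else (none, curI + n * d, curJ, tmp - n) := by
  rcases hd with rfl | rfl <;>
  induction n generalizing curI tmp with
  | zero =>
      simp only [loopI]
      rw [if_neg (by rintro ⟨-, h1, h2⟩; omega)]
      simp
  | succ n ih =>
      simp only [loopI, ih]
      push_cast
      split_ifs <;>
        first
          | (exfalso; omega)
          | (simp only [Prod.mk.injEq, Option.some.injEq, true_and]; omega)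

-- ===== VERDICT (by name: the statement is the Claim_ definition above) =====
theorem get_spec : Claim_equal_get := by
  intro tarI tarJ _
  unfold Spec_get _root_.get get_alt
  simp only
  set di := tarI - 5000 with hdi
  set dj := tarJ - 5000 with hdj
  set r := max |di| |dj| with hr
  have hdir : |di| ≤ r := by rw [hr]; exact le_max_left _ _
  have hdjr : |dj| ≤ r := by rw [hr]; exact le_max_right _ _
  have hedge : r = |di| ∨ r = |dj| := by
    rw [hr]; exact max_choice _ _
  have hdi2 : -r ≤ di ∧ di ≤ r := abs_le.mp hdir
  have hdj2 : -r ≤ dj ∧ dj ≤ r := abs_le.mp hdjr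
  have hedge2 : di = r ∨ di = -r ∨ dj = r ∨ dj = -r := by
    rcases hedge with h | h <;>
      rcases abs_cases di with ⟨h1, -⟩ | ⟨h1, -⟩ <;>
      rcases abs_cases dj with ⟨h2, -⟩ | ⟨h2, -⟩ <;> omega
  have hr0 : 0 ≤ r := le_trans (abs_nonneg di) hdir
  clear hdir hdjr hedge
  clear_value di dj r
  clear hr
  have hn1 : ((2 * r + 1 - 1).toNat : Int) = 2 * r := by omega
  rw [loopJ_eq (-1) (Or.inr rfl), hn1]
  by_cases hstart : r + 5000 = tarI ∧ r + 5000 = tarJ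
  · rw [if_pos hstart, if_pos (show di = r by omega)]
    have h2 : dj = r := by omega
    rw [h2]
    norm_num
  · rw [if_neg hstart]
    by_cases hbot : di = r
    · -- target on the bottom row, strictly left of the start corner
      rw [if_pos (by refine ⟨by omega, by omega, by omega⟩)]
      dsimp only
      rw [if_pos hbot, show (tarJ - (r + 5000)) * (-1) = r - dj by omega]
    · rw [if_neg (by rintro ⟨h, -⟩; exact hbot (by omega))]
      dsimp only
      rw [loopI_eq (-1) (Or.inr rfl), hn1]
      by_cases hleft : dj = -r
      · rw [if_pos (by refine ⟨by omega, by omega, by omega⟩)]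
        dsimp only
        rw [if_neg hbot, if_pos hleft, show (tarI - (r + 5000)) * (-1) = r - di by omega]
      · rw [if_neg (by rintro ⟨h, -⟩; exact hleft (by omega))]
        dsimp only
        rw [loopJ_eq 1 (Or.inl rfl), hn1]
        by_cases htop : di = -r
        · rw [if_pos (by refine ⟨by omega, by omega, by omega⟩)]
          dsimp only
          rw [if_neg hbot, if_neg hleft, if_pos htop,
              show (tarJ - (r + 5000 + 2 * r * -1)) * 1 = dj + r by omega]
          congr 1
          ring
        · rw [if_neg (by rintro ⟨h, -⟩; exact htop (by omega))]
          dsimp only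
          rw [loopI_eq 1 (Or.inl rfl)]
          have hright : dj = r := by omega
          -- r ≥ 1 here: r = 0 would force di = 0 = r, contradicting hbot
          have hn2 : ((2 * r + 1 - 2).toNat : Int) = 2 * r - 1 := by omega
          rw [hn2,
              if_pos (by refine ⟨by omega, by omega, by omega⟩)]
          dsimp only
          rw [if_neg hbot, if_neg hleft, if_neg htop,
              show (tarI - (r + 5000 + 2 * r * -1)) * 1 = di + r by omega]
          congr 1
          ring
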